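-- pv_equiv track=rewrite | github.com/pypa/hatch | src/hatch/utils/runner.py | select_environments
-- ===== SOURCE A (Python) =====
-- from typing import TYPE_CHECKING, Any
--
-- def select_environments(
--     environments: dict[str, dict[str, Any]],
--     included_variables: dict[str, set[str]],
--     excluded_variables: dict[str, set[str]],
-- ):
--     selected_environments = []
--     for env_name, variables in environments.items():
--         exclude = False
--         for excluded_variable, excluded_values in excluded_variables.items():
--             if excluded_variable not in variables:
--                 continue
--
--             value = variables[excluded_variable]
--             if not excluded_values or value in excluded_values:
--                 exclude = True
--                 break
--
--         if exclude:
--             continue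
--
--         for included_variable, included_values in included_variables.items():
--             if included_variable not in variables:
--                 exclude = True
--                 break
--
--             value = variables[included_variable]
--             if included_values and value not in included_values:
--                 exclude = True
--                 break
--
--         if not exclude:
--             selected_environments.append(env_name)
--
--     return selected_environments
-- ===== SOURCE B (Python) =====
-- def select_environments(environments, included_variables, excluded_variables):
--     # Constraint-major filtering: successively shrink the candidate list,
--     # one constraint at a time, instead of checking all constraints per env.
--     candidates = list(environments.items())
--     for var, vals in excluded_variables.items():
--         candidates = [(n, vs) for n, vs in candidates
--                       if not (var in vs and (not vals or vs[var] in vals))]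
--     for var, vals in included_variables.items():
--         candidates = [(n, vs) for n, vs in candidates
--                       if var in vs and (not vals or vs[var] in vals)]
--     return [n for n, _ in candidates]
-- ===== Notes on version B (the rewrite author's own statement) =====
-- stated objective: alternative
-- what changed: Environment-major double loop with break/continue flags replaced by constraint-major successive filtering of a shrinking candidate list.
import Mathlib
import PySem

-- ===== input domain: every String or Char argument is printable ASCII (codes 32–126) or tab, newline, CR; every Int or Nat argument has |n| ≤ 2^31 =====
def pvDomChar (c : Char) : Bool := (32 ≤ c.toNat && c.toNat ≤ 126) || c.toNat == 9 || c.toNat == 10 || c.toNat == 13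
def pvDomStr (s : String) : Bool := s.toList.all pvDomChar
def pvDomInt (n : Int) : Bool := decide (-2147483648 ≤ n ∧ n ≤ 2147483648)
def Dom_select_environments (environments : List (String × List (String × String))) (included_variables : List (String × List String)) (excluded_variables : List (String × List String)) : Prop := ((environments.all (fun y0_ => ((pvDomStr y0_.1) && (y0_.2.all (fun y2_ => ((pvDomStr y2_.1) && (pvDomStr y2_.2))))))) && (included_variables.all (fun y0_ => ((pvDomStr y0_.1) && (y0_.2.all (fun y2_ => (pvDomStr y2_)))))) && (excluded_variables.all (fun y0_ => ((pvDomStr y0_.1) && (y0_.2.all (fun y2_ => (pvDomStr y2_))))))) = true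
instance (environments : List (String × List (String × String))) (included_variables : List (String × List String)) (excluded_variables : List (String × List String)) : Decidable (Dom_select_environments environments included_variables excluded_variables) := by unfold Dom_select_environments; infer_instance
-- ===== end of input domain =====

-- B replaces A's environment-major double loop (break/continue flags) by constraint-major
-- successive filtering of a shrinking candidate list; same cost, different decomposition.


-- dict lookup (first match = Python dict lookup under the association-list convention)
def pyLookup (vars : List (String × String)) (k : String) : Option String :=
  (vars.find? (fun p => p.1 == k)).map Prod.snd

-- ===== PORT A =====
-- A's inner loop over excluded_variables: returns the `exclude` flag (break = return true)
def aExcLoop (vs : List (String × String)) : List (String × List String) → Bool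
  | [] => false
  | (v, vals) :: rest =>
    match pyLookup vs v with
    | none => aExcLoop vs rest
    | some value => if vals.isEmpty || vals.contains value then true else aExcLoop vs rest

-- A's inner loop over included_variables: returns the `exclude` flag
def aIncLoop (vs : List (String × String)) : List (String × List String) → Bool
  | [] => false
  | (v, vals) :: rest =>
    match pyLookup vs v with
    | none => true
    | some value => if !vals.isEmpty && !vals.contains value then true else aIncLoop vs rest

def select_environments (environments : List (String × List (String × String))) (included_variables : List (String × List String)) (excluded_variables : List (String × List String)) : List String :=
  environments.foldl (fun acc e =>
    if aExcLoop e.2 excluded_variables then acc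
    else if aIncLoop e.2 included_variables then acc
    else acc ++ [e.1]) []

-- ===== PORT B =====
-- keep-predicates of Source B's two comprehensions
def bExcKeep (c : String × List String) (vars : List (String × String)) : Bool :=
  match pyLookup vars c.1 with
  | none => true
  | some v => !(c.2.isEmpty || c.2.contains v)

def bIncKeep (c : String × List String) (vars : List (String × String)) : Bool :=
  match pyLookup vars c.1 with
  | none => false
  | some v => c.2.isEmpty || c.2.contains v

def select_environments_alt (environments : List (String × List (String × String))) (included_variables : List (String × List String)) (excluded_variables : List (String × List String)) : List String :=
  (included_variables.foldl (fun cand c => cand.filter (fun e => bIncKeep c e.2))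
    (excluded_variables.foldl (fun cand c => cand.filter (fun e => bExcKeep c e.2)) environments)).map Prod.fst

-- ===== PRECONDITION & SPEC =====
def Spec_select_environments (environments : List (String × List (String × String))) (included_variables : List (String × List String)) (excluded_variables : List (String × List String)) (out : List String) : Prop := out = select_environments_alt environments included_variables excluded_variables
instance (environments : List (String × List (String × String))) (included_variables : List (String × List String)) (excluded_variables : List (String × List String)) (out : List String) : Decidable (Spec_select_environments environments included_variables excluded_variables out) := by unfold Spec_select_environments; infer_instance

-- ===== CLAIM (what is proved, stated in full; the proofs are below) =====
def Claim_equal_select_environments : Prop := ∀ (environments : List (String × List (String × String))) (included_variables : List (String × List String)) (excluded_variables : List (String × List String)), Dom_select_environments environments included_variables excluded_variables → Spec_select_environments environments included_variables excluded_variables (select_environments environments included_variables excluded_variables)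

-- ===== LEMMAS AND PROOFS =====

-- successive filtering over a list of constraints = one filter by the conjunction
theorem foldl_filter_eq_filter_all {α β : Type} (p : α → β → Bool) :
    ∀ (cs : List α) (l : List β),
      cs.foldl (fun cand c => cand.filter (p c)) l = l.filter (fun x => cs.all (fun c => p c x)) := by
  intro cs
  induction cs with
  | nil => intro l; simp
  | cons c rest ih =>
    intro l
    simp only [List.foldl_cons, ih, List.filter_filter, List.all_cons]
    exact List.filter_congr (fun x _ => by rw [Bool.and_comm])

-- A's excluded-variables loop is the negation of B's conjunction of bExcKeep
theorem aExcLoop_eq (vars : List (String × String)) :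
    ∀ cs : List (String × List String),
      aExcLoop vars cs = !cs.all (fun c => bExcKeep c vars) := by
  intro cs
  induction cs with
  | nil => simp [aExcLoop]
  | cons c rest ih =>
    obtain ⟨v, vals⟩ := c
    cases hpl : pyLookup vars v with
    | none => simp [aExcLoop, bExcKeep, hpl, ih]
    | some value => cases vals <;> simp [aExcLoop, bExcKeep, hpl, ih, Bool.or_assoc]

-- A's included-variables loop is the negation of B's conjunction of bIncKeep
theorem aIncLoop_eq (vars : List (String × String)) :
    ∀ cs : List (String × List String),
      aIncLoop vars cs = !cs.all (fun c => bIncKeep c vars) := by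
  intro cs
  induction cs with
  | nil => simp [aIncLoop]
  | cons c rest ih =>
    obtain ⟨v, vals⟩ := c
    cases hpl : pyLookup vars v with
    | none => simp [aIncLoop, bIncKeep, hpl]
    | some value => cases vals <;> simp [aIncLoop, bIncKeep, hpl, ih]

-- ===== VERDICT (by name: the statement is the Claim_ definition above) =====
theorem select_environments_spec : Claim_equal_select_environments := by
  intro environments included_variables excluded_variables _
  unfold Spec_select_environments select_environments select_environments_alt
  rw [foldl_filter_eq_filter_all, foldl_filter_eq_filter_all, List.filter_filter]
  have : ∀ (e : String × List (String × String)) (acc : List String),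
      (if aExcLoop e.2 excluded_variables then acc
       else if aIncLoop e.2 included_variables then acc
       else acc ++ [e.1])
      = if (included_variables.all (fun c => bIncKeep c e.2)
            && excluded_variables.all (fun c => bExcKeep c e.2)) then acc ++ [e.1] else acc := by
    intro e acc
    rw [aExcLoop_eq, aIncLoop_eq]
    cases hx : excluded_variables.all (fun c => bExcKeep c e.2) <;>
      cases hi : included_variables.all (fun c => bIncKeep c e.2) <;> simp
  calc environments.foldl (fun acc e =>
          if aExcLoop e.2 excluded_variables then acc
          else if aIncLoop e.2 included_variables then acc
          else acc ++ [e.1]) []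
      = environments.foldl (fun acc e =>
          if (included_variables.all (fun c => bIncKeep c e.2)
              && excluded_variables.all (fun c => bExcKeep c e.2)) then acc ++ [e.1] else acc) [] := by
        have hfun : (fun (acc : List String) (e : String × List (String × String)) =>
            if aExcLoop e.2 excluded_variables then acc
            else if aIncLoop e.2 included_variables then acc
            else acc ++ [e.1])
          = fun acc e =>
            if (included_variables.all (fun c => bIncKeep c e.2)
                && excluded_variables.all (fun c => bExcKeep c e.2)) then acc ++ [e.1] else acc := by
          funext acc e
          exact this e acc
        rw [hfun]
    _ = (environments.filter (fun e => included_variables.all (fun c => bIncKeep c e.2)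
              && excluded_variables.all (fun c => bExcKeep c e.2))).map Prod.fst := by
        simpa using PySem.List.foldl_append_if
          (p := fun e : String × List (String × String) =>
            included_variables.all (fun c => bIncKeep c e.2)
              && excluded_variables.all (fun c => bExcKeep c e.2))
          (f := Prod.fst) (l := environments) (acc := [])
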